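-- pv_equiv track=rewrite | github.com/PaulSff/ai-taskvector | gui/flet/components/workflow/units_library_types.py | _parse_units_library_text
-- ===== SOURCE A (Python) =====
-- def _parse_units_library_text(text: str) -> tuple[list[str], list[str]]:
--     """
--     Parse the formatted Units Library string into unit type names and pipeline type names.
--
--     Format: unit lines "TypeName : description", then separator "--", then pipeline lines.
--     """
--     unit_types: list[str] = []
--     pipeline_types: list[str] = []
--     in_pipeline_section = False
--     for line in text.splitlines():
--         line = line.strip()
--         if not line or line.startswith("---") or "Units Library" in line or "Environments" in line or "Graph environments" in line:
--             continue
--         if line == "--":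
--             in_pipeline_section = True
--             continue
--         if " : " in line:
--             type_name = line.split(" : ", 1)[0].strip()
--             if not type_name:
--                 continue
--             if in_pipeline_section:
--                 pipeline_types.append(type_name)
--             else:
--                 unit_types.append(type_name)
--     return (unit_types, pipeline_types)
-- ===== SOURCE B (Python) =====
-- def _parse_units_library_text(text: str) -> tuple[list[str], list[str]]:
--     """Split once at the first '--' separator line, then run one shared
--     extraction routine over each section."""
--     lines = [ln.strip() for ln in text.splitlines()]
--     try:
--         i = lines.index("--")
--         unit_lines, pipeline_lines = lines[:i], lines[i + 1:]
--     except ValueError: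
--         unit_lines, pipeline_lines = lines, []
--
--     def extract(section: list[str]) -> list[str]:
--         names: list[str] = []
--         for line in section:
--             if (not line or line.startswith("---") or "Units Library" in line
--                     or "Environments" in line or "Graph environments" in line):
--                 continue
--             if " : " in line:
--                 name = line.split(" : ", 1)[0].strip()
--                 if name:
--                     names.append(name)
--         return names
--
--     return (extract(unit_lines), extract(pipeline_lines))
-- ===== Notes on version B (the rewrite author's own statement) =====
-- stated objective: alternative
-- what changed: Replaces A's single pass with a mutable in_pipeline flag by an explicit split of the stripped lines at the first '--' line into two sections, then one shared extraction routine applied to each section.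
import Mathlib
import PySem

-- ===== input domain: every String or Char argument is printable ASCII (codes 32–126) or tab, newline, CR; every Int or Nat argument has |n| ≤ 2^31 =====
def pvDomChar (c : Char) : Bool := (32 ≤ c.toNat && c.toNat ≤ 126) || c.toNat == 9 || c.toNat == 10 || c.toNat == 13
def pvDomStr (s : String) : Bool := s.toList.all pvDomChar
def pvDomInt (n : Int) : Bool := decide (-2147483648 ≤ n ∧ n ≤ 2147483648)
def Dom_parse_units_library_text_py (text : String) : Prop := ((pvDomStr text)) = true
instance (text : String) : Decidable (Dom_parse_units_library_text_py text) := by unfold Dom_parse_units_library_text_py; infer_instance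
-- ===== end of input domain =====

-- B re-decomposes A's one-pass flag loop as: split the stripped lines once at the
-- first "--" separator, then run one shared extraction routine over each section.

-- ===== PORT A =====
-- A's loop body (named for the proofs; a literal transcription of the loop's branches,
-- in order). split(" : ", 1)[0]: the separator is nonempty so splitMax? is some, and the
-- result list is nonempty so index 0 exists — the getD defaults are unreachable.
def pvBodyA (acc : List String × List String × Bool) (rawline : String) :
    List String × List String × Bool :=
  let line := PySem.Str.strip rawline
  if line == "" || PySem.Str.startswith line "---" || PySem.Str.isIn "Units Library" line
      || PySem.Str.isIn "Environments" line || PySem.Str.isIn "Graph environments" line then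
    acc
  else if line == "--" then
    (acc.1, acc.2.1, true)
  else if PySem.Str.isIn " : " line then
    let type_name := PySem.Str.strip (((PySem.Str.splitMax? line " : " 1).getD []).getD 0 "")
    if type_name == "" then acc
    else if acc.2.2 then (acc.1, acc.2.1 ++ [type_name], acc.2.2)
    else (acc.1 ++ [type_name], acc.2.1, acc.2.2)
  else acc

def parse_units_library_text_py (text : String) : List String × List String :=
  let r := (PySem.Str.splitlines text).foldl pvBodyA ([], [], false)
  (r.1, r.2.1)

-- ===== PORT B =====
-- lines[:i], lines[i+1:] around the first exact "--" line; the ([], []) base gives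
-- (all lines, []) when no separator exists, matching the except-ValueError branch.
def pvSplitAtSep : List String → List String × List String
  | [] => ([], [])
  | l :: ls =>
    if l == "--" then ([], ls)
    else
      let p := pvSplitAtSep ls
      (l :: p.1, p.2)

-- the shared per-line extraction: the name kept from one (already stripped) line, if any
def pvKeep? (line : String) : Option String :=
  if line == "" || PySem.Str.startswith line "---" || PySem.Str.isIn "Units Library" line
      || PySem.Str.isIn "Environments" line || PySem.Str.isIn "Graph environments" line then
    none
  else if PySem.Str.isIn " : " line then
    let name := PySem.Str.strip (((PySem.Str.splitMax? line " : " 1).getD []).getD 0 "")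
    if name == "" then none else some name
  else none

def pvExtractNames (section_ : List String) : List String :=
  section_.filterMap pvKeep?

def parse_units_library_text_py_alt (text : String) : List String × List String :=
  let lines := (PySem.Str.splitlines text).map PySem.Str.strip
  let p := pvSplitAtSep lines
  (pvExtractNames p.1, pvExtractNames p.2)

-- ===== PRECONDITION & SPEC =====
def Spec_parse_units_library_text_py (text : String) (out : List String × List String) : Prop := out = parse_units_library_text_py_alt text
instance (text : String) (out : List String × List String) : Decidable (Spec_parse_units_library_text_py text out) := by unfold Spec_parse_units_library_text_py; infer_instance

-- ===== CLAIM (what is proved, stated in full; the proofs are below) =====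
def Claim_equal_parse_units_library_text_py : Prop := ∀ (text : String), Dom_parse_units_library_text_py text → Spec_parse_units_library_text_py text (parse_units_library_text_py text)

-- ===== LEMMAS AND PROOFS =====

-- "--" is never caught by the skip filter, so it always reaches the separator branch
theorem pvKeep_sep : pvKeep? "--" = none := by decide

-- A's loop body, phrased through the shared per-line extraction
theorem pvBodyA_eq (acc : List String × List String × Bool) (l : String) :
    pvBodyA acc l =
      if PySem.Str.strip l == "--" then (acc.1, acc.2.1, true)
      else
        match pvKeep? (PySem.Str.strip l) with
        | none => acc
        | some n =>
          if acc.2.2 then (acc.1, acc.2.1 ++ [n], acc.2.2) else (acc.1 ++ [n], acc.2.1, acc.2.2) := by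
  by_cases hsep : PySem.Str.strip l == "--"
  · have hl : PySem.Str.strip l = "--" := by simpa using hsep
    simp only [pvBodyA, hl]
    simp
    exact fun h => absurd h (by decide)
  · simp only [pvBodyA, pvKeep?, hsep, Bool.false_eq_true, if_false]
    split_ifs <;> rfl

-- once the flag is set, every further kept name goes to the pipeline side
theorem pvLoopA_true (ls : List String) : ∀ (u p : List String),
    ls.foldl pvBodyA (u, p, true) = (u, p ++ pvExtractNames (ls.map PySem.Str.strip), true) := by
  induction ls with
  | nil => intro u p; simp [pvExtractNames]
  | cons l ls ih =>
    intro u p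
    rw [List.foldl_cons, pvBodyA_eq]
    by_cases hsep : PySem.Str.strip l == "--"
    · have hl : PySem.Str.strip l = "--" := by simpa using hsep
      simp [ih, pvExtractNames, hl, pvKeep_sep]
    · cases hk : pvKeep? (PySem.Str.strip l) <;>
        simp [hsep, hk, ih, pvExtractNames]

-- before the separator, kept names go to the unit side; the first "--" hands the
-- rest of the lines to the pipeline side
theorem pvLoopA_false (ls : List String) : ∀ (u p : List String),
    ((ls.foldl pvBodyA (u, p, false)).1, (ls.foldl pvBodyA (u, p, false)).2.1)
      = (u ++ pvExtractNames (pvSplitAtSep (ls.map PySem.Str.strip)).1,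
         p ++ pvExtractNames (pvSplitAtSep (ls.map PySem.Str.strip)).2) := by
  induction ls with
  | nil => intro u p; simp [pvSplitAtSep, pvExtractNames]
  | cons l ls ih =>
    intro u p
    rw [List.foldl_cons, pvBodyA_eq]
    by_cases hsep : PySem.Str.strip l == "--"
    · have hl : PySem.Str.strip l = "--" := by simpa using hsep
      simp [hl, pvLoopA_true, pvSplitAtSep, pvExtractNames]
    · cases hk : pvKeep? (PySem.Str.strip l) <;>
        simp [hsep, hk, ih, pvSplitAtSep, pvExtractNames]

-- ===== VERDICT (by name: the statement is the Claim_ definition above) =====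
theorem parse_units_library_text_py_spec : Claim_equal_parse_units_library_text_py := by
  intro text _
  unfold Spec_parse_units_library_text_py parse_units_library_text_py parse_units_library_text_py_alt
  have h := pvLoopA_false (PySem.Str.splitlines text) [] []
  simp only [List.nil_append] at h
  simpa using h
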